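-- pv_equiv track=rewrite | github.com/yehudav/Project-Euler | problem 11.py | square_matrix_down_left_diagonals_max_product
-- ===== SOURCE A (Python) =====
-- def max_of_three(a, b, c):
--     return max(a, max(b, c))
--
-- def max_product(line, adjacent_digits_num):
--     max_product_of_line = 0
--
--     while len(line) >= adjacent_digits_num:
--         current_product = 1
--
--         for i in range(adjacent_digits_num):
--             current_product *= int(line[i])
--
--         max_product_of_line = max(current_product, max_product_of_line)
--
--         line = line[1:]
--
--     return max_product_of_line
--
-- def square_matrix_down_left_diagonals_max_product(m, adjacent_digits_number, matrix_len):
--     max_down_left_diagonals_product = 0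
--
--     for i in range(matrix_len - adjacent_digits_number + 1):
--         k = i
--         diagonal_a = []
--         diagonal_b = []
--
--         for j in range(matrix_len - i):
--             diagonal_a.append(m[k][j])
--             diagonal_b.append(m[j][k])
--             k += 1
--
--         a_product = max_product(diagonal_a, adjacent_digits_number)
--         b_product = max_product(diagonal_b, adjacent_digits_number)
--
--         max_down_left_diagonals_product = max_of_three(max_down_left_diagonals_product, a_product, b_product)
--
--     return max_down_left_diagonals_product
-- ===== SOURCE B (Python) =====
-- def square_matrix_down_left_diagonals_max_product(m, adjacent_digits_number, matrix_len):
--     # Enumerate every down-right window start (r, c) directly; no diagonal lists, no slicing.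
--     n = adjacent_digits_number
--     best = 0
--     for r in range(matrix_len - n + 1):
--         for c in range(matrix_len - n + 1):
--             p = 1
--             for t in range(n):
--                 p *= m[r + t][c + t]
--             if p > best:
--                 best = p
--     return best
-- ===== Notes on version B (the rewrite author's own statement) =====
-- stated objective: alternative
-- what changed: Instead of materialising each diagonal as a list and re-slicing it for every window (line = line[1:]), B enumerates every down-right window start (r, c) directly and multiplies the k cells in place, with no list building or slicing.
import Mathlib
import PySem

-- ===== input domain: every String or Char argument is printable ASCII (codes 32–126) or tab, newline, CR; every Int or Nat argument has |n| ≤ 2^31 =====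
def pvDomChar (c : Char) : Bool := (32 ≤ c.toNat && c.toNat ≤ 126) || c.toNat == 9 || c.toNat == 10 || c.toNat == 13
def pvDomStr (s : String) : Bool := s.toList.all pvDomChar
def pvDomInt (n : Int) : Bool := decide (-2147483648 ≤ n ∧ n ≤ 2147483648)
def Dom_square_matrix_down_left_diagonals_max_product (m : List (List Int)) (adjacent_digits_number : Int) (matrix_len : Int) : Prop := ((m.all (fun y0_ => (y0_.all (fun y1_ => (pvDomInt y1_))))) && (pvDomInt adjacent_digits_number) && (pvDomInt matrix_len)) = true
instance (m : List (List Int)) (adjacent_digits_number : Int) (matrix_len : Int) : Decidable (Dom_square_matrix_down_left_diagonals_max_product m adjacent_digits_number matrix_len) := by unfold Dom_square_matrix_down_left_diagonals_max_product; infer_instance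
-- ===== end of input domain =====

-- B enumerates every down-right window start (r, c) directly instead of materialising each
-- diagonal as a list and re-slicing it per window (a different traversal of the same windows).

-- m[a][b] (indices are always in range on inputs admitted by Pre_; getD is never hit there)
def pvCell (m : List (List Int)) (a b : Int) : Int :=
  (PySem.List.pyGet? ((PySem.List.pyGet? m a).getD []) b).getD 0

-- ===== PORT A =====
-- product of line[i] for i in range(n)  (the inner for loop of max_product)
def pvProdTake (line : List Int) (n : Int) : Int :=
  (PySem.List.pyRange 0 n 1).foldl (fun cp i => cp * (PySem.List.pyGet? line i).getD 0) 1

-- while len(line) >= n: … ; line = line[1:]   (acc = max_product_of_line)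
def pv_max_product (line : List Int) (n : Int) (acc : Int) : Int :=
  if (line.length : Int) ≥ n then
    match line with
    | [] => acc          -- Python loops forever here (reachable only for n ≤ 0, outside Pre_)
    | _ :: tl => pv_max_product tl n (max (pvProdTake line n) acc)
  else acc

def square_matrix_down_left_diagonals_max_product (m : List (List Int)) (adjacent_digits_number : Int) (matrix_len : Int) : Int :=
  (PySem.List.pyRange 0 (matrix_len - adjacent_digits_number + 1) 1).foldl (fun acc i =>
    -- for j in range(matrix_len - i): append m[k][j] / m[j][k]; k += 1   (state = (k, diagonal_a, diagonal_b))
    let st := (PySem.List.pyRange 0 (matrix_len - i) 1).foldl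
      (fun (s : Int × List Int × List Int) j =>
        (s.1 + 1, s.2.1 ++ [pvCell m s.1 j], s.2.2 ++ [pvCell m j s.1]))
      (i, ([], []))
    let aP := pv_max_product st.2.1 adjacent_digits_number 0
    let bP := pv_max_product st.2.2 adjacent_digits_number 0
    max acc (max aP bP)) 0    -- max_of_three(acc, a_product, b_product)

-- ===== PORT B =====
def square_matrix_down_left_diagonals_max_product_alt (m : List (List Int)) (adjacent_digits_number : Int) (matrix_len : Int) : Int :=
  (PySem.List.pyRange 0 (matrix_len - adjacent_digits_number + 1) 1).foldl (fun best r =>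
    (PySem.List.pyRange 0 (matrix_len - adjacent_digits_number + 1) 1).foldl (fun best c =>
      let p := (PySem.List.pyRange 0 adjacent_digits_number 1).foldl
        (fun p t => p * pvCell m (r + t) (c + t)) 1
      if best < p then p else best) best) 0

-- ===== PRECONDITION & SPEC =====
-- Exactly where Python A returns: adjacent_digits_number ≥ 1 or an empty outer range
-- (otherwise the while loop never terminates) and, when the outer loop runs
-- (n ≤ matrix_len), every cell A reads exists: matrix_len rows, and row ρ reaching
-- column min(ρ + matrix_len - n, matrix_len - 1).
def Pre_square_matrix_down_left_diagonals_max_product (m : List (List Int)) (adjacent_digits_number : Int) (matrix_len : Int) : Prop :=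
  (1 ≤ adjacent_digits_number ∨ matrix_len - adjacent_digits_number + 1 ≤ 0) ∧
  (adjacent_digits_number ≤ matrix_len →
    (matrix_len ≤ (m.length : Int) ∧
     ∀ r ∈ List.range matrix_len.toNat,
       min ((r : Int) + matrix_len - adjacent_digits_number + 1) matrix_len ≤ ((m.getD r []).length : Int)))
instance (m : List (List Int)) (adjacent_digits_number : Int) (matrix_len : Int) : Decidable (Pre_square_matrix_down_left_diagonals_max_product m adjacent_digits_number matrix_len) := by unfold Pre_square_matrix_down_left_diagonals_max_product; infer_instance

def pvWitness_square_matrix_down_left_diagonals_max_product : List (List Int) × Int × Int :=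
  ([[1, 2], [3, 4]], 2, 2)

def Spec_square_matrix_down_left_diagonals_max_product (m : List (List Int)) (adjacent_digits_number : Int) (matrix_len : Int) (out : Int) : Prop := out = square_matrix_down_left_diagonals_max_product_alt m adjacent_digits_number matrix_len
instance (m : List (List Int)) (adjacent_digits_number : Int) (matrix_len : Int) (out : Int) : Decidable (Spec_square_matrix_down_left_diagonals_max_product m adjacent_digits_number matrix_len out) := by unfold Spec_square_matrix_down_left_diagonals_max_product; infer_instance

-- ===== CLAIM (what is proved, stated in full; the proofs are below) =====
def Claim_equal_square_matrix_down_left_diagonals_max_product : Prop := ∀ (m : List (List Int)) (adjacent_digits_number : Int) (matrix_len : Int), Dom_square_matrix_down_left_diagonals_max_product m adjacent_digits_number matrix_len → Pre_square_matrix_down_left_diagonals_max_product m adjacent_digits_number matrix_len → Spec_square_matrix_down_left_diagonals_max_product m adjacent_digits_number matrix_len (square_matrix_down_left_diagonals_max_product m adjacent_digits_number matrix_len)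

-- ===== LEMMAS AND PROOFS =====

-- max over a list of Ints together with 0 (both programs' running maxima start at 0)
def pvMyMax (l : List Int) : Int := l.foldl max 0

-- product of the length-N down-right window starting at cell (r, c)
def pvW (m : List (List Int)) (r c N : Nat) : Int :=
  ((List.range N).map (fun t => pvCell m ((r + t : Nat) : Int) ((c + t : Nat) : Int))).prod

-- every window product A looks at: diagonals i, window starts s, both reflections
def pvBigA (m : List (List Int)) (N Kn Ln : Nat) : List Int :=
  (List.range Kn).flatMap (fun i =>
    ((List.range (Ln - i + 1 - N)).map (fun s => pvW m (i + s) s N)) ++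
    ((List.range (Ln - i + 1 - N)).map (fun s => pvW m s (i + s) N)))

-- every window product B looks at: all grid starts (r, c)
def pvBigB (m : List (List Int)) (N Kn : Nat) : List Int :=
  (List.range Kn).flatMap (fun r => (List.range Kn).map (fun c => pvW m r c N))

lemma pvPyRange_zero_toNat (x : Int) :
    PySem.List.pyRange 0 x 1 = List.map (fun k : Nat => (k : Int)) (List.range x.toNat) := by
  by_cases h : 0 ≤ x
  · obtain ⟨k, rfl⟩ := Int.eq_ofNat_of_zero_le h
    simpa using PySem.List.pyRange_zero_natCast k
  · have h0 : x.toNat = 0 := by omega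
    rw [h0]
    simp only [List.range_zero, List.map_nil]
    simp [PySem.List.pyRange]
    omega

lemma pvFoldl_max_shift (l : List Int) : ∀ a b : Int,
    List.foldl max (max a b) l = max a (List.foldl max b l) := by
  induction l with
  | nil => intro a b; simp
  | cons x xs ih =>
    intro a b
    simp only [List.foldl_cons]
    rw [max_assoc]
    exact ih a (max b x)

lemma pvMyMax_nonneg (l : List Int) : 0 ≤ pvMyMax l := by
  exact (PySem.List.le_foldl_max l 0).1

lemma pvFoldl_max_of_nonneg (l : List Int) (a : Int) (h : 0 ≤ a) :
    List.foldl max a l = max a (pvMyMax l) := by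
  have := pvFoldl_max_shift l a 0
  rwa [max_eq_left h] at this

lemma pvLe_myMax (l : List Int) (x : Int) (h : x ∈ l) : x ≤ pvMyMax l := by
  exact (PySem.List.le_foldl_max l 0).2 x h

lemma pvMyMax_le (l : List Int) (b : Int) (hb : 0 ≤ b) (h : ∀ x ∈ l, x ≤ b) : pvMyMax l ≤ b := by
  have aux : ∀ (t : List Int) (a : Int), a ≤ b → (∀ x ∈ t, x ≤ b) → List.foldl max a t ≤ b := by
    intro t
    induction t with
    | nil => intro a ha _; simpa using ha
    | cons y ys ih =>
      intro a ha hy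
      simp only [List.foldl_cons]
      exact ih (max a y) (max_le ha (hy y (by simp))) (fun x hx => hy x (by simp [hx]))
  exact aux l 0 hb h

lemma pvMyMax_eq_of_mem_iff (l₁ l₂ : List Int) (h : ∀ x, x ∈ l₁ ↔ x ∈ l₂) :
    pvMyMax l₁ = pvMyMax l₂ := by
  refine le_antisymm ?_ ?_
  · exact pvMyMax_le _ _ (pvMyMax_nonneg _) (fun x hx => pvLe_myMax _ x ((h x).1 hx))
  · exact pvMyMax_le _ _ (pvMyMax_nonneg _) (fun x hx => pvLe_myMax _ x ((h x).2 hx))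

-- folding max over a flatMap, one block at a time
lemma pvFoldl_max_flatMap {α : Type} (l : List α) (g : α → List Int) : ∀ a : Int,
    l.foldl (fun acc x => List.foldl max acc (g x)) a = List.foldl max a (l.flatMap g) := by
  induction l with
  | nil => intro a; simp
  | cons x xs ih =>
    intro a
    simp only [List.foldl_cons, List.flatMap_cons, List.foldl_append]
    exact ih _

lemma pvFoldl_mul {α : Type} (l : List α) (f : α → Int) : ∀ a : Int,
    l.foldl (fun cp x => cp * f x) a = a * (l.map f).prod := by
  induction l with
  | nil => intro a; simp
  | cons x xs ih =>
    intro a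
    simp only [List.foldl_cons, List.map_cons, List.prod_cons]
    rw [ih]
    ring

-- the inner product loop as a mathematical window product
lemma pvProdTake_eq (line : List Int) (N : Nat) :
    pvProdTake line (N : Int) = ((List.range N).map (fun t => line.getD t 0)).prod := by
  unfold pvProdTake
  rw [pvPyRange_zero_toNat]
  simp only [Int.toNat_natCast]
  rw [pvFoldl_mul, one_mul, List.map_map]
  congr 1
  refine List.map_congr_left (fun t _ => ?_)
  simp [Function.comp, PySem.List.pyGet?_natCast, List.getD_eq_getElem?_getD]

-- max_product slides over all |line|+1-N windows
lemma pv_max_product_char (N : Nat) (hN : 1 ≤ N) : ∀ (line : List Int) (acc : Int),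
    pv_max_product line (N : Int) acc =
      List.foldl max acc ((List.range (line.length + 1 - N)).map
        (fun s => pvProdTake (line.drop s) (N : Int))) := by
  intro line
  induction line with
  | nil =>
    intro acc
    rw [pv_max_product]
    have h0 : ¬ (((List.nil : List Int).length : Int) ≥ (N : Int)) := by
      simp; omega
    rw [if_neg h0]
    have : 0 + 1 - N = 0 := by omega
    simp [this]
  | cons x tl ih =>
    intro acc
    rw [pv_max_product]
    by_cases h : (((x :: tl).length : Int) ≥ (N : Int))
    · rw [if_pos h]
      simp only [List.length_cons] at h
      have hlen : N ≤ tl.length + 1 := by exact_mod_cast h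
      rw [ih]
      have hcount : tl.length + 1 + 1 - N = (tl.length + 1 - N) + 1 := by omega
      simp only [List.length_cons]
      rw [hcount, List.range_succ_eq_map, List.map_cons, List.foldl_cons, List.drop_zero,
        List.map_map]
      rw [max_comm (pvProdTake (x :: tl) (N : Int)) acc]
      refine congrArg _ (List.map_congr_left (fun s _ => ?_))
      simp [Function.comp, List.drop_succ_cons]
    · rw [if_neg h]
      simp only [List.length_cons] at h
      have : (x :: tl).length + 1 - N = 0 := by
        simp only [List.length_cons]
        omega
      rw [this]
      simp

-- the diagonal-building loop produces two mapped ranges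
lemma pvDiag_build (m : List (List Int)) (d : Nat) (i0 : Int) :
    (List.foldl (fun (s : Int × List Int × List Int) j =>
        (s.1 + 1, s.2.1 ++ [pvCell m s.1 j], s.2.2 ++ [pvCell m j s.1]))
      (i0, ([], []))
      (List.map (fun k : Nat => (k : Int)) (List.range d))) =
    ((i0 + d),
     List.map (fun j : Nat => pvCell m (i0 + (j : Int)) (j : Int)) (List.range d),
     List.map (fun j : Nat => pvCell m (j : Int) (i0 + (j : Int))) (List.range d)) := by
  induction d with
  | zero => simp
  | succ d ih =>
    simp only [List.range_succ, List.map_append, List.foldl_append, ih,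
      List.map_cons, List.map_nil, List.foldl_cons, List.foldl_nil, Prod.mk.injEq]
    exact ⟨by push_cast; ring, trivial⟩

-- window s of a mapped diagonal is the window product of consecutive cells
lemma pvWindow_of_map (f : Nat → Int) (d N s : Nat) (h : s + N ≤ d) :
    pvProdTake (((List.range d).map f).drop s) (N : Int) =
      ((List.range N).map (fun t => f (s + t))).prod := by
  rw [pvProdTake_eq]
  congr 1
  refine List.map_congr_left (fun t ht => ?_)
  rw [List.mem_range] at ht
  rw [List.getD_eq_getElem?_getD, List.getElem?_drop, ← List.getD_eq_getElem?_getD,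
    PySem.List.getD_map_range _ _ _ _ (by omega)]

lemma pvMyMax_cons (a : Int) (l : List Int) (h : 0 ≤ a) :
    pvMyMax (a :: l) = max a (pvMyMax l) := by
  unfold pvMyMax
  simp only [List.foldl_cons]
  rw [pvFoldl_max_of_nonneg _ _ (le_max_left 0 a), max_eq_right h]
  rfl

lemma pvMyMax_append (l1 l2 : List Int) :
    pvMyMax (l1 ++ l2) = max (pvMyMax l1) (pvMyMax l2) := by
  unfold pvMyMax
  rw [List.foldl_append]
  exact pvFoldl_max_of_nonneg _ _ (pvMyMax_nonneg l1)

lemma pvMyMax_flatMap {α : Type} (l : List α) (g : α → List Int) :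
    pvMyMax (l.flatMap g) = pvMyMax (l.map (fun x => pvMyMax (g x))) := by
  induction l with
  | nil => rfl
  | cons x xs ih =>
    rw [List.flatMap_cons, pvMyMax_append, ih, List.map_cons,
      pvMyMax_cons _ _ (pvMyMax_nonneg (g x))]

lemma pvIf_max (a b : Int) : (if a < b then b else a) = max a b := by
  by_cases h : a < b
  · rw [if_pos h, max_eq_right h.le]
  · rw [if_neg h, max_eq_left (not_lt.1 h)]

lemma pvA_char (m : List (List Int)) (n L : Int) (hn : 1 ≤ n) :
    square_matrix_down_left_diagonals_max_product m n L =
      pvMyMax (pvBigA m n.toNat (L - n + 1).toNat L.toNat) := by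
  obtain ⟨N, rfl⟩ : ∃ N : Nat, n = (N : Int) := ⟨n.toNat, by omega⟩
  have hN : 1 ≤ N := by omega
  simp only [Int.toNat_natCast]
  unfold square_matrix_down_left_diagonals_max_product
  simp only [pvPyRange_zero_toNat, pvDiag_build]
  rw [List.foldl_map]
  refine (PySem.List.foldl_congr_mem _ _
      (fun (acc : Int) (i : Nat) => max acc
        (max (pvMyMax ((List.range (L.toNat - i + 1 - N)).map
                (fun s => pvW m (i + s) s N)))
             (pvMyMax ((List.range (L.toNat - i + 1 - N)).map
                (fun s => pvW m s (i + s) N))))) 0 ?_).trans ?_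
  · intro acc i hi
    rw [List.mem_range] at hi
    have hd : (L - (i : Int)).toNat = L.toNat - i := by omega
    dsimp only
    rw [hd, pv_max_product_char N hN, pv_max_product_char N hN]
    simp only [List.length_map, List.length_range]
    refine congrArg (max acc) ?_
    have hw : ∀ g : Nat → Int,
        (List.range (L.toNat - i + 1 - N)).map
            (fun s => pvProdTake (((List.range (L.toNat - i)).map g).drop s) (N : Int)) =
          (List.range (L.toNat - i + 1 - N)).map
            (fun s => ((List.range N).map (fun t => g (s + t))).prod) := by
      intro g
      refine List.map_congr_left (fun s hs => ?_)
      rw [List.mem_range] at hs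
      exact pvWindow_of_map g (L.toNat - i) N s (by omega)
    rw [hw, hw]
    refine congrArg₂ max (congrArg _ ?_) (congrArg _ ?_) <;>
      refine List.map_congr_left (fun s _ => ?_) <;>
      · unfold pvW
        refine congrArg List.prod (List.map_congr_left (fun t _ => ?_))
        congr 1 <;> push_cast <;> ring
  · refine Eq.trans List.foldl_map.symm ?_
    unfold pvBigA
    rw [pvMyMax_flatMap]
    refine congrArg pvMyMax (List.map_congr_left (fun i _ => ?_))
    rw [pvMyMax_append]

lemma pvB_char (m : List (List Int)) (n L : Int) (_hn : 1 ≤ n) :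
    square_matrix_down_left_diagonals_max_product_alt m n L =
      pvMyMax (pvBigB m n.toNat (L - n + 1).toNat) := by
  unfold square_matrix_down_left_diagonals_max_product_alt
  simp only [pvPyRange_zero_toNat, List.foldl_map]
  refine (PySem.List.foldl_congr_mem _ _
      (fun (best : Int) (r : Nat) =>
        List.foldl max best ((List.range (L - n + 1).toNat).map
          (fun c => pvW m r c n.toNat))) 0 ?_).trans ?_
  · intro best r _
    refine (PySem.List.foldl_congr_mem _ _
        (fun (best : Int) (c : Nat) => max best (pvW m r c n.toNat)) best ?_).trans
      List.foldl_map.symm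
    intro b c _
    rw [pvIf_max]
    refine congrArg (max b) ?_
    unfold pvW
    refine (pvFoldl_mul (α := Nat) _ _ _).trans ?_
    rw [one_mul]
    refine congrArg List.prod (List.map_congr_left (fun t _ => ?_))
    congr 1 <;> push_cast <;> ring
  · rw [pvFoldl_max_flatMap]
    rfl

lemma pvMem_iff (m : List (List Int)) (N Kn Ln : Nat) (hN : 1 ≤ N)
    (hK : Kn ≠ 0 → Kn = Ln + 1 - N ∧ N ≤ Ln) :
    ∀ x, x ∈ pvBigA m N Kn Ln ↔ x ∈ pvBigB m N Kn := by
  intro x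
  simp only [pvBigA, pvBigB, List.mem_flatMap, List.mem_map, List.mem_append, List.mem_range]
  constructor
  · rintro ⟨i, hi, h⟩
    obtain ⟨hK1, hK2⟩ := hK (by omega)
    rcases h with ⟨s, hs, rfl⟩ | ⟨s, hs, rfl⟩
    · exact ⟨i + s, by omega, s, by omega, rfl⟩
    · exact ⟨s, by omega, i + s, by omega, rfl⟩
  · rintro ⟨r, hr, c, hc, rfl⟩
    obtain ⟨hK1, hK2⟩ := hK (by omega)
    by_cases hrc : c ≤ r
    · refine ⟨r - c, by omega, Or.inl ⟨c, by omega, ?_⟩⟩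
      have : r - c + c = r := by omega
      rw [this]
    · refine ⟨c - r, by omega, Or.inr ⟨r, by omega, ?_⟩⟩
      have : c - r + r = c := by omega
      rw [this]

-- ===== VERDICT (by name: the statement is the Claim_ definition above) =====
theorem square_matrix_down_left_diagonals_max_product_spec : Claim_equal_square_matrix_down_left_diagonals_max_product := by
  intro m n L _ hPre
  unfold Spec_square_matrix_down_left_diagonals_max_product
  obtain ⟨hn, -⟩ := hPre
  rcases hn with hn | hK
  · rw [pvA_char m n L hn, pvB_char m n L hn]
    refine pvMyMax_eq_of_mem_iff _ _ (pvMem_iff m n.toNat (L - n + 1).toNat L.toNat ?_ ?_)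
    · omega
    · intro hK0
      constructor <;> omega
  · unfold square_matrix_down_left_diagonals_max_product
      square_matrix_down_left_diagonals_max_product_alt
    simp only [pvPyRange_zero_toNat, show (L - n + 1).toNat = 0 from by omega]
    simp
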